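-- pv_equiv track=rewrite | github.com/peaceknight05/warbler-dictionaries | automations/isticBrief.py | convertToIndices
-- ===== SOURCE A (Python) =====
-- STENO_ORDER = ["#", "S1", "T1", "K", "P1", "W", "H", "R1", "A", "O", "*",
-- 				"E", "U", "F", "R2", "P2", "B", "L", "G", "T2", "S2", "D", "Z"]
--
-- LEFT_RIGHT_DUPL = ["S", "T", "P", "R"]
--
-- def convertToIndices(stroke, force_right=False):
-- 	indices = []
-- 	middle = 100
-- 	for i, key in enumerate(stroke):
-- 		if key in "AO*-EU":
-- 			middle = i
-- 		if key == "-":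
-- 			indices.append(10)
-- 		elif key not in LEFT_RIGHT_DUPL:
-- 			indices.append(STENO_ORDER.index(key))
-- 		elif force_right or i > middle:
-- 			indices.append(STENO_ORDER.index(key+"2"))
-- 		else:
-- 			indices.append(STENO_ORDER.index(key+"1"))
-- 	return indices
-- ===== SOURCE B (Python) =====
-- STENO_ORDER = ["#", "S1", "T1", "K", "P1", "W", "H", "R1", "A", "O", "*",
--                "E", "U", "F", "R2", "P2", "B", "L", "G", "T2", "S2", "D", "Z"]
--
-- LEFT_RIGHT_DUPL = ["S", "T", "P", "R"]
--
-- def convertToIndices(stroke, force_right=False):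
--     # Pass 1: index of the first middle-marker key; sentinel = len(stroke) if none.
--     boundary = len(stroke)
--     for i, key in enumerate(stroke):
--         if key in "AO*-EU":
--             boundary = i
--             break
--     # Pass 2: map each key to its index using the fixed boundary.
--     indices = []
--     for i, key in enumerate(stroke):
--         if key == "-":
--             indices.append(10)
--         elif key not in LEFT_RIGHT_DUPL:
--             indices.append(STENO_ORDER.index(key))
--         elif force_right or i > boundary:
--             indices.append(STENO_ORDER.index(key + "2"))
--         else:
--             indices.append(STENO_ORDER.index(key + "1"))
--     return indices
-- ===== Notes on version B (the rewrite author's own statement) =====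
-- stated objective: alternative
-- what changed: Replaces the interleaved incremental `middle` tracking inside the single loop by an up-front first-marker boundary scan followed by a separate stateless mapping pass.
-- intended difference: On strokes with a duplicable key (S/T/P/R) at index > 100 with no middle-marker key before it and force_right false, A returns the right-hand index (an artefact of its middle=100 sentinel) while B returns the left-hand index, which is the intended value since no middle marker has occurred yet. — e.g. on convertToIndices("KKKKKKKKKKKKKKKKKKKKKKKKKKKKKKKKKKKKKKKKKKKKKKKKKKKKKKKKKKKKKKKKKKKKKKKKKKKKKKKKKKKKKKKKKKKKKKKKKKKKKS", false): A returns [3, 3, 3, 3, 3, 3, 3, 3, 3, 3, 3, 3, 3, 3, 3, 3, 3, 3, 3, 3, 3, 3, 3, 3, 3, 3, 3, 3, 3, 3, 3, 3, 3, 3, 3, 3, 3, 3, 3, 3…, B returns [3, 3, 3, 3, 3, 3, 3, 3, 3, 3, 3, 3, 3, 3, 3, 3, 3, 3, 3, 3, 3, 3, 3, 3, 3, 3, 3, 3, 3, 3, 3, 3, 3, 3, 3, 3, 3, 3, 3, 3…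
import Mathlib
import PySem

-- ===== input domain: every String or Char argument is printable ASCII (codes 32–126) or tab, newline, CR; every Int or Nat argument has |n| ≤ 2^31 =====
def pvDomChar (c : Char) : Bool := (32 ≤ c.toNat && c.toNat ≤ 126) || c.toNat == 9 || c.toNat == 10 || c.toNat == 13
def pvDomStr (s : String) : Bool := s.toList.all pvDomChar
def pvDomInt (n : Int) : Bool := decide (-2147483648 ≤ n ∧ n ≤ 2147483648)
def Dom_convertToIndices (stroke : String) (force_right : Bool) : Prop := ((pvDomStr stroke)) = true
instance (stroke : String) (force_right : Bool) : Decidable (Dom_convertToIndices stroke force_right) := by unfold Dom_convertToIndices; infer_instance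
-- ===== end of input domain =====

-- B replaces A's interleaved incremental `middle` tracking by an up-front first-marker
-- boundary scan plus a separate stateless mapping pass (objective: alternative decomposition).

-- ===== PORT A =====
def stenoOrder : List String :=
  ["#", "S1", "T1", "K", "P1", "W", "H", "R1", "A", "O", "*",
   "E", "U", "F", "R2", "P2", "B", "L", "G", "T2", "S2", "D", "Z"]

def duplKeys : List Char := ['S', 'T', 'P', 'R']

-- STENO_ORDER.index(s); raises ValueError in Python when s is absent — Pre_ excludes that.
def idxOf (s : String) : Int := ((PySem.List.index? stenoOrder s).getD 0 : Nat)

def loopA (fr : Bool) : List Char → Int → Int → List Int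
  | [], _, _ => []
  | key :: rest, i, middle =>
    let middle' := if key ∈ "AO*-EU".toList then i else middle
    let idx : Int :=
      if key = '-' then 10
      else if key ∉ duplKeys then idxOf (String.mk [key])
      else if fr || i > middle' then idxOf (String.mk [key, '2'])
      else idxOf (String.mk [key, '1'])
    idx :: loopA fr rest (i + 1) middle'

def convertToIndices (stroke : String) (force_right : Bool) : List Int :=
  loopA force_right stroke.toList 0 100

-- ===== PORT B =====
-- Pass 1 of Source B: first index of a middle-marker key, default = len(stroke).
def findBoundary : List Char → Int → Int → Int
  | [], _, dflt => dflt
  | key :: rest, i, dflt =>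
    if key ∈ "AO*-EU".toList then i else findBoundary rest (i + 1) dflt

-- Pass 2 of Source B: stateless mapping against the fixed boundary.
def mapB (fr : Bool) (bnd : Int) : List Char → Int → List Int
  | [], _ => []
  | key :: rest, i =>
    (if key = '-' then (10 : Int)
     else if key ∉ duplKeys then idxOf (String.mk [key])
     else if fr || i > bnd then idxOf (String.mk [key, '2'])
     else idxOf (String.mk [key, '1'])) :: mapB fr bnd rest (i + 1)

def convertToIndices_alt (stroke : String) (force_right : Bool) : List Int :=
  mapB force_right (findBoundary stroke.toList 0 (stroke.toList.length)) stroke.toList 0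

-- ===== PRECONDITION & SPEC =====
-- Pre_ excludes exactly the strokes containing a character that is not a steno key:
-- on those Python's STENO_ORDER.index raises ValueError.
def Pre_convertToIndices (stroke : String) (force_right : Bool) : Prop :=
  (stroke.toList.all (fun c =>
    c ∈ ['#', 'S', 'T', 'K', 'P', 'W', 'H', 'R', 'A', 'O', '*', '-', 'E', 'U', 'F', 'B', 'L', 'G', 'D', 'Z'])) = true
instance (stroke : String) (force_right : Bool) : Decidable (Pre_convertToIndices stroke force_right) := by
  unfold Pre_convertToIndices; infer_instance

def pvWitness_convertToIndices : String × Bool := ("STROEBG", false)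

-- On strokes with a duplicable key (S/T/P/R) at index > 100 and no middle-marker key before it
-- (force_right false), A returns the right-hand index — an artefact of its middle=100 sentinel —
-- while B returns the left-hand index, the intended value since no middle marker has occurred yet.
def D_convertToIndices (stroke : String) (force_right : Bool) : Prop :=
  force_right = false ∧
    (((stroke.toList.take (stroke.toList.findIdx (fun c => decide (c ∈ "AO*-EU".toList)))).drop 101).any
      (fun c => decide (c ∈ duplKeys))) = true
instance (stroke : String) (force_right : Bool) : Decidable (D_convertToIndices stroke force_right) := by
  unfold D_convertToIndices; infer_instance

def Spec_convertToIndices (stroke : String) (force_right : Bool) (out : List Int) : Prop :=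
  ¬ D_convertToIndices stroke force_right → out = convertToIndices_alt stroke force_right
instance (stroke : String) (force_right : Bool) (out : List Int) : Decidable (Spec_convertToIndices stroke force_right out) := by
  unfold Spec_convertToIndices; infer_instance

def pvDiffWitness_convertToIndices : String × Bool :=
  ("KKKKKKKKKKKKKKKKKKKKKKKKKKKKKKKKKKKKKKKKKKKKKKKKKKKKKKKKKKKKKKKKKKKKKKKKKKKKKKKKKKKKKKKKKKKKKKKKKKKKKS", false)

def pvDiffWitnessOut_convertToIndices : (List Int) × (List Int) :=
  ([3, 3, 3, 3, 3, 3, 3, 3, 3, 3, 3, 3, 3, 3, 3, 3, 3, 3, 3, 3, 3, 3, 3, 3, 3, 3, 3, 3, 3, 3, 3, 3, 3, 3, 3, 3, 3, 3, 3, 3, 3, 3, 3, 3, 3, 3, 3, 3, 3, 3, 3, 3, 3, 3, 3, 3, 3, 3, 3, 3, 3, 3, 3, 3, 3, 3, 3, 3, 3, 3, 3, 3, 3, 3, 3, 3, 3, 3, 3, 3, 3, 3, 3, 3, 3, 3, 3, 3, 3, 3, 3, 3, 3, 3, 3, 3, 3, 3, 3, 3, 3, 20], [3, 3, 3, 3,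 3, 3, 3, 3, 3, 3, 3, 3, 3, 3, 3, 3, 3, 3, 3, 3, 3, 3, 3, 3, 3, 3, 3, 3, 3, 3, 3, 3, 3, 3, 3, 3, 3, 3, 3, 3, 3, 3, 3, 3, 3, 3, 3, 3, 3, 3, 3, 3, 3, 3, 3, 3, 3, 3, 3, 3, 3, 3, 3, 3, 3, 3, 3, 3, 3, 3, 3, 3, 3, 3, 3, 3, 3, 3, 3, 3, 3, 3, 3, 3, 3, 3, 3, 3, 3, 3, 3, 3, 3, 3, 3, 3, 3, 3, 3, 3, 3, 1])

-- ===== CLAIM (what is proved, stated in full; the proofs are below) =====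
def Claim_unchanged_convertToIndices : Prop := ∀ (stroke : String) (force_right : Bool), Dom_convertToIndices stroke force_right → Pre_convertToIndices stroke force_right → Spec_convertToIndices stroke force_right (convertToIndices stroke force_right)

def Claim_changed_convertToIndices : Prop := Dom_convertToIndices (pvDiffWitness_convertToIndices.1) (pvDiffWitness_convertToIndices.2) ∧ Pre_convertToIndices (pvDiffWitness_convertToIndices.1) (pvDiffWitness_convertToIndices.2) ∧ D_convertToIndices (pvDiffWitness_convertToIndices.1) (pvDiffWitness_convertToIndices.2) ∧ convertToIndices (pvDiffWitness_convertToIndices.1) (pvDiffWitness_convertToIndices.2) = pvDiffWitnessOut_convertToIndices.1 ∧ convertToIndices_alt (pvDiffWitness_convertToIndices.1) (pvDiffWitness_convertToIndices.2) = pvDiffWitnessOut_convertToIndices.2 ∧ pvDiffWitnessOut_convertToIndices.1 ≠ pvDiffWitnessOut_convertToIndices.2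

def Claim_exact_convertToIndices : Prop := ∀ (stroke : String) (force_right : Bool), Dom_convertToIndices stroke force_right → Pre_convertToIndices stroke force_right → D_convertToIndices stroke force_right → convertToIndices stroke force_right ≠ convertToIndices_alt stroke force_right

-- ===== LEMMAS AND PROOFS =====

-- first-marker index as a pure Nat function (findIdx returns length when absent)
def fb (cs : List Char) : Nat := cs.findIdx (fun c => decide (c ∈ "AO*-EU".toList))

lemma dupl_not_marker {c : Char} (h : c ∈ duplKeys) : c ∉ "AO*-EU".toList := by
  simp only [duplKeys, List.mem_cons, List.not_mem_nil, or_false] at h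
  rcases h with rfl | rfl | rfl | rfl <;> decide

lemma loopA_cons (fr : Bool) (c : Char) (rest : List Char) (i mid : Int) :
    loopA fr (c :: rest) i mid =
      (if c = '-' then (10 : Int)
       else if c ∉ duplKeys then idxOf (String.mk [c])
       else if fr || i > (if c ∈ "AO*-EU".toList then i else mid) then idxOf (String.mk [c, '2'])
       else idxOf (String.mk [c, '1'])) ::
      loopA fr rest (i + 1) (if c ∈ "AO*-EU".toList then i else mid) := rfl

lemma mapB_cons (fr : Bool) (bnd : Int) (c : Char) (rest : List Char) (i : Int) :
    mapB fr bnd (c :: rest) i =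
      (if c = '-' then (10 : Int)
       else if c ∉ duplKeys then idxOf (String.mk [c])
       else if fr || i > bnd then idxOf (String.mk [c, '2'])
       else idxOf (String.mk [c, '1'])) :: mapB fr bnd rest (i + 1) := rfl

lemma fb_cons (c : Char) (rest : List Char) :
    fb (c :: rest) = if c ∈ "AO*-EU".toList then 0 else fb rest + 1 := by
  unfold fb
  rw [List.findIdx_cons]
  by_cases h : c ∈ "AO*-EU".toList
  · rw [if_pos h, decide_eq_true h]; rfl
  · rw [if_neg h, decide_eq_false h]; rfl

lemma fb_le_length (cs : List Char) : fb cs ≤ cs.length := List.findIdx_le_length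

lemma findBoundary_spec : ∀ (cs : List Char) (i dflt : Int),
    findBoundary cs i dflt = if fb cs = cs.length then dflt else i + (fb cs : Int) := by
  intro cs
  induction cs with
  | nil => intro i dflt; simp [findBoundary, fb]
  | cons c rest ih =>
    intro i dflt
    rw [show findBoundary (c :: rest) i dflt
          = if c ∈ "AO*-EU".toList then i else findBoundary rest (i + 1) dflt from rfl,
        fb_cons]
    by_cases h : c ∈ "AO*-EU".toList
    · rw [if_pos h, if_pos h, if_neg (by simp)]
      simp
    · rw [if_neg h, if_neg h, ih]
      rcases Nat.eq_or_lt_of_le (fb_le_length rest) with he | hl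
      · simp [he]
      · rw [if_neg (by omega : ¬ fb rest = rest.length),
            if_neg (by simp only [List.length_cons]; omega : ¬ fb rest + 1 = (c :: rest).length)]
        push_cast; ring

lemma findBoundary_eq_fb (cs : List Char) :
    findBoundary cs 0 (cs.length : Int) = (fb cs : Int) := by
  rw [findBoundary_spec]
  split <;> simp_all

lemma loopA_eq_mapB (fr : Bool) : ∀ (cs : List Char) (i mid bnd : Int),
    ((mid < i ∧ bnd < i) ∨
     (mid = 100 ∧ bnd = i + (fb cs : Int) ∧
       (fr = false → ∀ (k : Nat) (hk : k < cs.length), (k : Int) ≤ (fb cs : Int) →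
          cs[k] ∈ duplKeys → i + (k : Int) ≤ 100))) →
    loopA fr cs i mid = mapB fr bnd cs i := by
  intro cs
  induction cs with
  | nil => intro i mid bnd _; rfl
  | cons c rest ih =>
    intro i mid bnd hinv
    rw [loopA_cons, mapB_cons, List.cons.injEq]
    by_cases hm : c ∈ "AO*-EU".toList
    · -- marker head: c is not duplicable, head item ignores the condition
      have hnd : c ∉ duplKeys := fun hd => dupl_not_marker hd hm
      have hhead : (if c = '-' then (10 : Int)
          else if c ∉ duplKeys then idxOf (String.mk [c])
          else if fr || i > (if c ∈ "AO*-EU".toList then i else mid) then idxOf (String.mk [c, '2'])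
          else idxOf (String.mk [c, '1'])) =
          (if c = '-' then (10 : Int)
          else if c ∉ duplKeys then idxOf (String.mk [c])
          else if fr || i > bnd then idxOf (String.mk [c, '2'])
          else idxOf (String.mk [c, '1'])) := by
        by_cases hdash : c = '-'
        · rw [if_pos hdash, if_pos hdash]
        · rw [if_neg hdash, if_neg hdash, if_pos hnd, if_pos hnd]
      refine ⟨hhead, ?_⟩
      rw [if_pos hm]
      rcases hinv with ⟨_, h2⟩ | ⟨_, h2, _⟩
      · exact ih (i + 1) i bnd (Or.inl ⟨by omega, by omega⟩)
      · have hfb0 : fb (c :: rest) = 0 := by rw [fb_cons, if_pos hm]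
        have hbnd : bnd = i := by rw [h2, hfb0]; simp
        exact ih (i + 1) i bnd (Or.inl ⟨by omega, by omega⟩)
    · -- non-marker head
      have hfb : fb (c :: rest) = fb rest + 1 := by rw [fb_cons, if_neg hm]
      have hdash : c ≠ '-' := by intro h; subst h; exact hm (by decide)
      rw [if_neg hm]
      rcases hinv with ⟨h1, h2⟩ | ⟨h1, h2, h3⟩
      · -- P-state
        refine ⟨?_, ih (i + 1) mid bnd (Or.inl ⟨by omega, by omega⟩)⟩
        rw [if_neg hdash, if_neg hdash]
        by_cases hd : c ∈ duplKeys
        · rw [if_neg (not_not_intro hd), if_neg (not_not_intro hd),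
              if_pos (by simp [show i > mid from h1] : (fr || decide (i > mid)) = true),
              if_pos (by simp [show i > bnd from h2] : (fr || decide (i > bnd)) = true)]
        · rw [if_pos hd, if_pos hd]
      · -- ¬P-state
        have hbnd : bnd = (i + 1) + (fb rest : Int) := by rw [h2, hfb]; push_cast; ring
        constructor
        · rw [if_neg hdash, if_neg hdash]
          by_cases hd : c ∈ duplKeys
          · rw [if_neg (not_not_intro hd), if_neg (not_not_intro hd)]
            cases fr with
            | true => rw [if_pos (by simp : (true || decide (i > mid)) = true),
                          if_pos (by simp : (true || decide (i > bnd)) = true)]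
            | false =>
              have hle : i ≤ 100 := by
                have := h3 rfl 0 (by simp) (by simp) (by simpa using hd)
                simpa using this
              have hfbnn : (0 : Int) ≤ (fb rest : Int) := by positivity
              rw [if_neg (by simp; omega : ¬ ((false || decide (i > mid)) = true)),
                  if_neg (by simp; omega : ¬ ((false || decide (i > bnd)) = true))]
          · rw [if_pos hd, if_pos hd]
        · refine ih (i + 1) mid bnd (Or.inr ⟨h1, hbnd, ?_⟩)
          intro hfr k hk hkfb hdupl
          have := h3 hfr (k + 1) (by simpa using Nat.succ_lt_succ hk)
            (by rw [hfb]; push_cast; push_cast at hkfb; omega)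
            (by simpa using hdupl)
          push_cast at this ⊢
          omega

-- getElem characterizations (used for Claim_exact)
lemma length_loopA (fr : Bool) : ∀ (cs : List Char) (i mid : Int),
    (loopA fr cs i mid).length = cs.length := by
  intro cs
  induction cs with
  | nil => intro i mid; rfl
  | cons c rest ih => intro i mid; rw [loopA_cons]; simp [ih]

lemma length_mapB (fr : Bool) (bnd : Int) : ∀ (cs : List Char) (i : Int),
    (mapB fr bnd cs i).length = cs.length := by
  intro cs
  induction cs with
  | nil => intro i; rfl
  | cons c rest ih => intro i; rw [mapB_cons]; simp [ih]

lemma getElem_mapB (fr : Bool) (bnd : Int) : ∀ (cs : List Char) (i : Int) (k : Nat)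
    (hk : k < cs.length),
    (mapB fr bnd cs i)[k]'(by rw [length_mapB]; exact hk) =
      (if cs[k] = '-' then (10 : Int)
       else if cs[k] ∉ duplKeys then idxOf (String.mk [cs[k]])
       else if fr || i + (k : Int) > bnd then idxOf (String.mk [cs[k], '2'])
       else idxOf (String.mk [cs[k], '1'])) := by
  intro cs
  induction cs with
  | nil => intro i k hk; simp at hk
  | cons c rest ih =>
    intro i k hk
    cases k with
    | zero => simp [mapB_cons]
    | succ k =>
      have hk' : k < rest.length := by simpa using Nat.lt_of_succ_lt_succ hk
      have hrec := ih (i + 1) k hk'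
      simp only [mapB_cons, List.getElem_cons_succ, hrec]
      have harith : i + 1 + (k : Int) = i + ((k : Nat) + 1 : Nat) := by push_cast; ring
      rw [harith]

lemma getElem_loopA (fr : Bool) : ∀ (cs : List Char) (i mid : Int) (k : Nat)
    (hk : k < cs.length), (∀ j (hj : j < k), cs[j]'(by omega) ∉ "AO*-EU".toList) →
    (loopA fr cs i mid)[k]'(by rw [length_loopA]; exact hk) =
      (if cs[k] = '-' then (10 : Int)
       else if cs[k] ∉ duplKeys then idxOf (String.mk [cs[k]])
       else if fr || i + (k : Int) > (if cs[k] ∈ "AO*-EU".toList then i + k else mid)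
         then idxOf (String.mk [cs[k], '2'])
       else idxOf (String.mk [cs[k], '1'])) := by
  intro cs
  induction cs with
  | nil => intro i mid k hk; simp at hk
  | cons c rest ih =>
    intro i mid k hk hnm
    cases k with
    | zero => simp [loopA_cons]
    | succ k =>
      have h0 : c ∉ "AO*-EU".toList := hnm 0 (Nat.succ_pos k)
      have hk' : k < rest.length := by simpa using Nat.lt_of_succ_lt_succ hk
      have hrec := ih (i + 1) mid k hk' (fun j hj => hnm (j + 1) (Nat.succ_lt_succ hj))
      simp only [loopA_cons, if_neg h0, List.getElem_cons_succ, hrec]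
      have harith : i + 1 + (k : Int) = i + ((k : Nat) + 1 : Nat) := by push_cast; ring
      rw [harith]
      rfl

lemma not_marker_of_lt_fb (cs : List Char) (j : Nat) (hj : j < cs.length) (hlt : j < fb cs) :
    cs[j] ∉ "AO*-EU".toList := by
  have := List.not_of_lt_findIdx (p := fun c => decide (c ∈ "AO*-EU".toList)) (xs := cs) hlt
  simpa using this

-- ===== VERDICT (by name: the statement is the Claim_ definition above) =====
theorem convertToIndices_spec : Claim_unchanged_convertToIndices := by
  intro stroke fr _ _ hnd
  unfold convertToIndices convertToIndices_alt
  set cs := stroke.toList with hcs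
  rw [findBoundary_eq_fb]
  apply loopA_eq_mapB
  refine Or.inr ⟨rfl, by simp, ?_⟩
  intro hfr k hk hkfb hdupl
  by_contra hgt
  have hk101 : 101 ≤ k := by push_cast at hgt; omega
  apply hnd
  unfold D_convertToIndices
  refine ⟨hfr, ?_⟩
  rw [List.any_eq_true]
  have hkfb' : k < fb cs := by
    rcases Nat.lt_or_ge k (fb cs) with h | h
    · exact h
    · exfalso
      have hke : k = fb cs := by push_cast at hkfb; omega
      have hfblt : fb cs < cs.length := hke ▸ hk
      have hmark : cs[fb cs]'hfblt ∈ "AO*-EU".toList := by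
        have := List.findIdx_getElem (w := hfblt) (p := fun c => decide (c ∈ "AO*-EU".toList)) (xs := cs)
        simpa [fb] using this
      exact dupl_not_marker (hke ▸ hdupl) hmark
  refine ⟨cs[k], ?_, by simpa using hdupl⟩
  have hlen1 : (cs.take (fb cs)).length = fb cs := by
    simp [List.length_take, Nat.min_eq_left (fb_le_length cs)]
  have hidx : k - 101 < ((cs.take (fb cs)).drop 101).length := by
    simp only [List.length_drop, hlen1]; omega
  have hget : ((cs.take (fb cs)).drop 101)[k - 101]'hidx = cs[k] := by
    rw [List.getElem_drop, List.getElem_take]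
    congr 1
    omega
  exact hget ▸ List.getElem_mem hidx

-- evaluation lemmas for the difference witness (avoid deep kernel reduction)
lemma fb_replicateKS : ∀ (n : Nat), fb (List.replicate n 'K' ++ ['S']) = n + 1 := by
  intro n
  induction n with
  | zero =>
    rw [show (List.replicate 0 'K' ++ ['S']) = ['S'] from rfl, fb_cons,
        if_neg (show ¬('S' ∈ "AO*-EU".toList) by decide)]
    rfl
  | succ n ih =>
    rw [show (List.replicate (n + 1) 'K' ++ ['S']) = 'K' :: (List.replicate n 'K' ++ ['S']) from rfl,
        fb_cons, if_neg (show ¬('K' ∈ "AO*-EU".toList) by decide), ih]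

lemma evalA : ∀ (n : Nat) (i : Int),
    loopA false (List.replicate n 'K' ++ ['S']) i 100 =
      List.replicate n (3 : Int) ++ [if i + (n : Int) > 100 then 20 else 1] := by
  intro n
  induction n with
  | zero =>
    intro i
    rw [show (List.replicate 0 'K' ++ ['S']) = ['S'] from rfl, loopA_cons,
        if_neg (show ¬('S' = '-') by decide),
        if_neg (show ¬('S' ∉ duplKeys) by decide),
        if_neg (show ¬('S' ∈ "AO*-EU".toList) by decide)]
    by_cases hi : i > 100
    · rw [if_pos (by simp [hi] : (false || decide (i > 100)) = true),
          if_pos (show i + ((0 : Nat) : Int) > 100 by push_cast; omega),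
          show idxOf (String.mk ['S', '2']) = 20 from by decide]
      rfl
    · rw [if_neg (by simp [hi] : ¬ ((false || decide (i > 100)) = true)),
          if_neg (show ¬ (i + ((0 : Nat) : Int) > 100) by push_cast; omega),
          show idxOf (String.mk ['S', '1']) = 1 from by decide]
      rfl
  | succ n ih =>
    intro i
    rw [show (List.replicate (n + 1) 'K' ++ ['S']) = 'K' :: (List.replicate n 'K' ++ ['S']) from rfl,
        loopA_cons,
        if_neg (show ¬('K' = '-') by decide),
        if_pos (show ('K' ∉ duplKeys) by decide),
        if_neg (show ¬('K' ∈ "AO*-EU".toList) by decide),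
        ih (i + 1),
        show idxOf (String.mk ['K']) = 3 from by decide,
        show i + 1 + (n : Int) = i + ((n + 1 : Nat) : Int) from by push_cast; ring,
        show (List.replicate (n + 1) (3 : Int)) = 3 :: List.replicate n (3 : Int) from rfl]
    rfl

lemma evalB : ∀ (n : Nat) (i bnd : Int), i + (n : Int) ≤ bnd →
    mapB false bnd (List.replicate n 'K' ++ ['S']) i = List.replicate n (3 : Int) ++ [1] := by
  intro n
  induction n with
  | zero =>
    intro i bnd hle
    rw [show (List.replicate 0 'K' ++ ['S']) = ['S'] from rfl, mapB_cons,
        if_neg (show ¬('S' = '-') by decide),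
        if_neg (show ¬('S' ∉ duplKeys) by decide),
        if_neg (by simp; push_cast at hle; omega : ¬ ((false || decide (i > bnd)) = true)),
        show idxOf (String.mk ['S', '1']) = 1 from by decide]
    rfl
  | succ n ih =>
    intro i bnd hle
    rw [show (List.replicate (n + 1) 'K' ++ ['S']) = 'K' :: (List.replicate n 'K' ++ ['S']) from rfl,
        mapB_cons,
        if_neg (show ¬('K' = '-') by decide),
        if_pos (show ('K' ∉ duplKeys) by decide),
        ih (i + 1) bnd (by push_cast at hle ⊢; omega),
        show idxOf (String.mk ['K']) = 3 from by decide,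
        show (List.replicate (n + 1) (3 : Int)) = 3 :: List.replicate n (3 : Int) from rfl]
    rfl

set_option maxRecDepth 8000 in
theorem convertToIndices_changed : Claim_changed_convertToIndices := by
  unfold Claim_changed_convertToIndices
  have hlist : (pvDiffWitness_convertToIndices.1).toList = List.replicate 101 'K' ++ ['S'] := by rfl
  have hout1 : pvDiffWitnessOut_convertToIndices.1 = List.replicate 101 (3 : Int) ++ [20] := by rfl
  have hout2 : pvDiffWitnessOut_convertToIndices.2 = List.replicate 101 (3 : Int) ++ [1] := by rfl
  refine ⟨?_, ?_, ?_, ?_, ?_, ?_⟩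
  · -- Dom
    show pvDomStr _ = true
    rw [show pvDomStr (pvDiffWitness_convertToIndices.1)
          = (List.replicate 101 'K' ++ ['S']).all pvDomChar from rfl, List.all_eq_true]
    intro x hx
    rcases List.mem_append.mp hx with h | h
    · rw [(List.mem_replicate.mp h).2]; decide
    · rw [List.mem_singleton.mp h]; decide
  · -- Pre
    unfold Pre_convertToIndices
    rw [hlist, List.all_eq_true]
    intro c hc
    rcases List.mem_append.mp hc with h | h
    · rw [(List.mem_replicate.mp h).2]; decide
    · rw [List.mem_singleton.mp h]; decide
  · -- D_
    refine ⟨rfl, ?_⟩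
    rw [hlist,
        show (List.replicate 101 'K' ++ ['S']).findIdx (fun c => decide (c ∈ "AO*-EU".toList))
          = fb (List.replicate 101 'K' ++ ['S']) from rfl,
        fb_replicateKS,
        List.take_of_length_le (by simp),
        List.drop_left' (by simp : (List.replicate 101 'K').length = 101)]
    decide
  · -- A's value
    show loopA false (pvDiffWitness_convertToIndices.1).toList 0 100 = _
    rw [hlist, evalA, if_pos (by norm_num : (0 : Int) + ((101 : Nat) : Int) > 100), hout1]
  · -- B's value
    show mapB false _ (pvDiffWitness_convertToIndices.1).toList 0 = _
    rw [hlist, findBoundary_eq_fb, fb_replicateKS,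
        evalB 101 0 ((102 : Nat) : Int) (by norm_num), hout2]
  · -- the two values differ
    intro h
    rw [hout1, hout2] at h
    have hlast := congrArg List.getLast? h
    rw [List.getLast?_concat, List.getLast?_concat] at hlast
    exact absurd (Option.some.inj hlast) (by norm_num)

theorem convertToIndices_tight : Claim_exact_convertToIndices := by
  intro stroke fr _ _ hd heq
  obtain ⟨hfr, hany⟩ := hd
  subst hfr
  set cs := stroke.toList with hcs
  rw [List.any_eq_true] at hany
  obtain ⟨c, hcmem, hcdupl⟩ := hany
  have hcdupl : c ∈ duplKeys := by simpa using hcdupl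
  obtain ⟨j, hj, hjc⟩ := List.mem_iff_getElem.mp hcmem
  have hfble := fb_le_length cs
  have hjlen : j < fb cs - 101 := by
    rw [List.length_drop, List.length_take,
        show (List.findIdx (fun c => decide (c ∈ "AO*-EU".toList)) cs) = fb cs from rfl,
        Nat.min_eq_left hfble] at hj
    exact hj
  set k := 101 + j with hkdef
  have hkfb : k < fb cs := by omega
  have hklen : k < cs.length := by omega
  have hck : cs[k]'hklen = c := by
    rw [← hjc, List.getElem_drop, List.getElem_take]
  have hAk := getElem_loopA false cs 0 100 k hklen
    (fun i hi => not_marker_of_lt_fb cs i (by omega) (by omega))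
  have hBk := getElem_mapB false ((fb cs : Nat) : Int) cs 0 k hklen
  have hcm : c ∉ "AO*-EU".toList := dupl_not_marker hcdupl
  have hcdash : c ≠ '-' := by intro h; subst h; exact hcm (by decide)
  rw [hck] at hAk hBk
  rw [if_neg hcdash, if_neg (not_not_intro hcdupl), if_neg hcm,
      if_pos (by simp; push_cast; omega :
        (false || decide ((0:Int) + (k:Int) > 100)) = true)] at hAk
  rw [if_neg hcdash, if_neg (not_not_intro hcdupl),
      if_neg (by simp; push_cast; omega :
        ¬ ((false || decide ((0:Int) + (k:Int) > ((fb cs : Nat) : Int))) = true))] at hBk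
  have hne : idxOf (String.mk [c, '2']) ≠ idxOf (String.mk [c, '1']) := by
    simp only [duplKeys, List.mem_cons, List.not_mem_nil, or_false] at hcdupl
    rcases hcdupl with rfl | rfl | rfl | rfl <;> decide
  unfold convertToIndices convertToIndices_alt at heq
  rw [findBoundary_eq_fb] at heq
  have hsame := congrArg (fun l => l[k]?) heq
  simp only at hsame
  rw [List.getElem?_eq_getElem (by rw [length_loopA]; exact hklen),
      List.getElem?_eq_getElem (by rw [length_mapB]; exact hklen)] at hsame
  rw [hAk, hBk] at hsame
  exact hne (Option.some.inj hsame)
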